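-- pv_equiv track=rewrite | github.com/Aasthaengg/IBMdataset | Python_codes/p03244/s152121456.py | count
-- ===== SOURCE A (Python) =====
-- def count(l):
--     odd = {}
--     even = {}
--     for idx, d in enumerate(l):
--         if idx%2 == 0:
--             res = even
--         else:
--             res = odd
--         if d in res:
--             res[d] += 1
--         else:
--             res[d] = 1
--     return odd, even
-- ===== SOURCE B (Python) =====
-- def count(l):
--     def freq(xs):
--         d = {}
--         for x in xs:
--             d[x] = d.get(x, 0) + 1
--         return d
--     return freq(l[1::2]), freq(l[::2])
-- ===== Notes on version B (the rewrite author's own statement) =====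
-- stated objective: simpler
-- what changed: Replaces A's single enumerate pass with a per-index parity branch and two live dict accumulators by two strided slices (l[1::2], l[::2]) each counted by one small frequency helper.
import Mathlib
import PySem

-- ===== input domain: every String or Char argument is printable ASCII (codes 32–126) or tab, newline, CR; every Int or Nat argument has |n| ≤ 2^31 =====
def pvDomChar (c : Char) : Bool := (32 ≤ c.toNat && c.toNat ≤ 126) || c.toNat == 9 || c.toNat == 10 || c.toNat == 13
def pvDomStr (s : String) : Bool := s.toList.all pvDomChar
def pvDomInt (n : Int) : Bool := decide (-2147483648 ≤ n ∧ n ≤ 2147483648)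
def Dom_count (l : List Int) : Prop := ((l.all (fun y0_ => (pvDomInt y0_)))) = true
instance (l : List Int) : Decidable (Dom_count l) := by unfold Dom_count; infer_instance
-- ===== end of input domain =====

-- B replaces A's single enumerate pass with a parity branch by two strided slices, each counted by a small frequency helper (objective: simpler).


-- ===== PORT A =====
def count (l : List Int) : (List (Int × Int)) × (List (Int × Int)) :=
  let r := (PySem.List.enumerate l 0).foldl
    (fun (st : PySem.Dict Int Int × PySem.Dict Int Int) (p : Int × Int) =>
      if PySem.Int.mod p.1 2 = 0 then
        -- res = even; if d in res: res[d] += 1 else: res[d] = 1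
        (st.1, if st.2.contains p.2 then st.2.insert p.2 (st.2.getD p.2 0 + 1)
               else st.2.insert p.2 1)
      else
        -- res = odd; same update
        (if st.1.contains p.2 then st.1.insert p.2 (st.1.getD p.2 0 + 1)
         else st.1.insert p.2 1, st.2))
    (PySem.Dict.empty, PySem.Dict.empty)
  (r.1.items, r.2.items)

-- ===== PORT B =====
-- helper freq(xs): d = {}; for x in xs: d[x] = d.get(x, 0) + 1
def pvFreq (xs : List Int) : PySem.Dict Int Int :=
  xs.foldl (fun d x => d.insert x (d.getD x 0 + 1)) PySem.Dict.empty

def count_alt (l : List Int) : (List (Int × Int)) × (List (Int × Int)) :=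
  ((pvFreq ((PySem.List.slice? l (some 1) none 2).getD [])).items,
   (pvFreq ((PySem.List.slice? l none none 2).getD [])).items)

-- ===== PRECONDITION & SPEC =====
def Spec_count (l : List Int) (out : (List (Int × Int)) × (List (Int × Int))) : Prop := out = count_alt l
instance (l : List Int) (out : (List (Int × Int)) × (List (Int × Int))) : Decidable (Spec_count l out) := by unfold Spec_count; infer_instance

-- ===== CLAIM (what is proved, stated in full; the proofs are below) =====
def Claim_equal_count : Prop := ∀ (l : List Int), Dom_count l → Spec_count l (count l)

-- ===== LEMMAS AND PROOFS =====

-- elements at even / odd positions, structurally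
mutual
def pvEvens : List Int → List Int
  | [] => []
  | x :: t => x :: pvOdds t
def pvOdds : List Int → List Int
  | [] => []
  | _ :: t => pvEvens t
end

lemma pv_filterMap_parity (l : List Int) :
    (List.range ((l.length + 1) / 2)).filterMap (fun k => l[2 * k]?) = pvEvens l ∧
    (List.range (l.length / 2)).filterMap (fun k => l[2 * k + 1]?) = pvOdds l := by
  induction l with
  | nil => simp [pvEvens, pvOdds]
  | cons x t ih =>
    constructor
    · have h2 : (t.length + 1 + 1) / 2 = t.length / 2 + 1 := by omega
      rw [List.length_cons, h2, List.range_succ_eq_map]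
      simp only [List.filterMap_cons, List.filterMap_map]
      have hk : ∀ k : Nat, ((x :: t)[2 * (k + 1)]? ) = t[2 * k + 1]? := by
        intro k
        have h3 : 2 * (k + 1) = 2 * k + 1 + 1 := by omega
        rw [h3]; simp
      simp only [Function.comp_def, hk]
      simp [pvEvens, ih.2]
    · rw [List.length_cons]
      have hk : ∀ k : Nat, ((x :: t)[2 * k + 1]? ) = t[2 * k]? := by intro k; simp
      simp only [hk]
      simpa [pvOdds] using ih.1

-- l[::2] is the even-position sublist
lemma pv_slice_evens (l : List Int) :
    (PySem.List.slice? l none none 2).getD [] = pvEvens l := by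
  simp only [PySem.List.slice?, PySem.List.sliceIndices]
  norm_num
  have hc : (if 0 < l.length then (((l.length : Int) + 2 - 1) / 2).toNat else 0)
      = (l.length + 1) / 2 := by split_ifs with h <;> omega
  have hidx : ∀ k : Nat, ((2 * (k : Int)).toNat) = 2 * k := by intro k; omega
  rw [hc]
  simp only [hidx]
  exact (pv_filterMap_parity l).1

-- l[1::2] is the odd-position sublist
lemma pv_slice_odds (l : List Int) :
    (PySem.List.slice? l (some 1) none 2).getD [] = pvOdds l := by
  simp only [PySem.List.slice?, PySem.List.sliceIndices]
  norm_num
  rcases l with _ | ⟨x, t⟩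
  · simp [pvOdds]
  · have hlen : 1 ≤ (x :: t).length := by simp
    have hmin : min 1 ((x :: t).length : Int) = 1 := by
      have : (1 : Int) ≤ ((x :: t).length : Int) := by exact_mod_cast hlen
      omega
    rw [hmin]
    have hc : (if 1 < (x :: t).length then ((((x :: t).length : Int) - 1 + 2 - 1) / 2).toNat else 0)
        = (x :: t).length / 2 := by split_ifs with h <;> omega
    have hidx : ∀ k : Nat, ((1 + 2 * (k : Int)).toNat) = 2 * k + 1 := by intro k; omega
    rw [hc]
    simp only [hidx]
    exact (pv_filterMap_parity (x :: t)).2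

-- A's membership-tested update is a single unconditional counting insert
lemma pv_stepA (d : PySem.Dict Int Int) (x : Int) :
    (if d.contains x then d.insert x (d.getD x 0 + 1) else d.insert x 1)
      = d.insert x (d.getD x 0 + 1) := by
  by_cases h : d.contains x = true
  · simp [h]
  · simp only [Bool.not_eq_true] at h
    rw [if_neg (by simp [h]), PySem.Dict.getD_of_not_contains d 0 h]
    norm_num

-- A's enumerate loop splits into one counting fold per parity class
lemma pv_foldA (l : List Int) (s : Int) (od ev : PySem.Dict Int Int) :
    (PySem.List.enumerate l s).foldl
      (fun (st : PySem.Dict Int Int × PySem.Dict Int Int) (p : Int × Int) =>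
        if PySem.Int.mod p.1 2 = 0 then
          (st.1, st.2.insert p.2 (st.2.getD p.2 0 + 1))
        else
          (st.1.insert p.2 (st.1.getD p.2 0 + 1), st.2))
      (od, ev)
    = if PySem.Int.mod s 2 = 0 then
        ((pvOdds l).foldl (fun d x => d.insert x (d.getD x 0 + 1)) od,
         (pvEvens l).foldl (fun d x => d.insert x (d.getD x 0 + 1)) ev)
      else
        ((pvEvens l).foldl (fun d x => d.insert x (d.getD x 0 + 1)) od,
         (pvOdds l).foldl (fun d x => d.insert x (d.getD x 0 + 1)) ev) := by
  induction l generalizing s od ev with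
  | nil =>
    simp only [PySem.List.enumerate_nil, List.foldl_nil, pvEvens, pvOdds]
    split <;> rfl
  | cons x t ih =>
    rw [PySem.List.enumerate_cons, List.foldl_cons]
    have hmod : PySem.Int.mod s 2 = s % 2 := PySem.Int.mod_eq_emod_of_pos (by omega)
    have hmod' : PySem.Int.mod (s + 1) 2 = (s + 1) % 2 := PySem.Int.mod_eq_emod_of_pos (by omega)
    by_cases hs : PySem.Int.mod s 2 = 0
    · have hs1 : ¬ PySem.Int.mod (s + 1) 2 = 0 := by rw [hmod']; rw [hmod] at hs; omega
      show (PySem.List.enumerate t (s+1)).foldl _ (if PySem.Int.mod s 2 = 0 then _ else _) = _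
      rw [if_pos hs, ih (s + 1), if_neg hs1, if_pos hs]
      simp only [pvEvens, pvOdds, List.foldl_cons]
    · have hs1 : PySem.Int.mod (s + 1) 2 = 0 := by rw [hmod']; rw [hmod] at hs; omega
      show (PySem.List.enumerate t (s+1)).foldl _ (if PySem.Int.mod s 2 = 0 then _ else _) = _
      rw [if_neg hs, ih (s + 1), if_pos hs1, if_neg hs]
      simp only [pvEvens, pvOdds, List.foldl_cons]

-- ===== VERDICT (by name: the statement is the Claim_ definition above) =====
theorem count_spec : Claim_equal_count := by
  intro l _
  show count l = count_alt l
  unfold count count_alt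
  rw [PySem.List.foldl_congr_mem _ _
      (fun (st : PySem.Dict Int Int × PySem.Dict Int Int) (p : Int × Int) =>
        if PySem.Int.mod p.1 2 = 0 then
          (st.1, st.2.insert p.2 (st.2.getD p.2 0 + 1))
        else
          (st.1.insert p.2 (st.1.getD p.2 0 + 1), st.2))
      _ (by
        intro acc p _
        by_cases hp : PySem.Int.mod p.1 2 = 0 <;>
          simp only [hp, if_false, if_pos, pv_stepA])]
  rw [pv_foldA, if_pos (show PySem.Int.mod 0 2 = 0 by decide),
      pv_slice_evens, pv_slice_odds]
  rfl
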